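-- pv_equiv track=rewrite | github.com/mohsenPourAzar/cp-quera | ب.ب.م.م/py/main.py | max_gcd_pair
-- ===== SOURCE A (Python) =====
-- def max_gcd_pair(S):
--     s = set(S)
--     m = max(S)
--     res = 0
--     i = m
--     while(i > 0):
--         a = i
--         cnt = 0
--         while (a<=m):
--             if a in s:
--                cnt += 1
--             a += i
--         if cnt >= 2:
--             res = i
--             break
--         i = i -1
--     return res
-- ===== SOURCE B (Python) =====
-- def _gcd(a, b):
--     while b != 0:
--         a, b = b, a % b
--     return a
--
--
-- def max_gcd_pair(S):
--     vals = [x for x in set(S) if x > 0]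
--     best = 0
--     for k in range(len(vals)):
--         for y in vals[k + 1:]:
--             g = _gcd(vals[k], y)
--             if g > best:
--                 best = g
--     return best
-- ===== Notes on version B (the rewrite author's own statement) =====
-- stated objective: alternative
-- what changed: Replaces A's downward divisor sieve (for each candidate i from max(S) down, scan all multiples of i and count hits in the set) by a direct brute-force maximum of gcd over all pairs of distinct positive values of S, with a hand-written Euclid gcd.
import Mathlib
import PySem

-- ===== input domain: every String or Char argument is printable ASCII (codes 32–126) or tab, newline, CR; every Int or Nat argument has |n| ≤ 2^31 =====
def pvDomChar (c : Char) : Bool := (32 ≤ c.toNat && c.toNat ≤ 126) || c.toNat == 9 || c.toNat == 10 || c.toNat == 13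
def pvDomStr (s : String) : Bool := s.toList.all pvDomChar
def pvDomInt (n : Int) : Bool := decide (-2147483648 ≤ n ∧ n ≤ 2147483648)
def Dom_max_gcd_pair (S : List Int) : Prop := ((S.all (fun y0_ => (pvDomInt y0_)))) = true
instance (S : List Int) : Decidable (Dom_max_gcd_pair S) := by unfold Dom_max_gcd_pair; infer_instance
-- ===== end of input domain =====

-- B replaces A's downward divisor-count sieve by a direct brute-force maximum of gcd over all
-- pairs of distinct positive values (objective: alternative algorithm, similar cost).

-- ===== PORT A =====
-- inner 'while a <= m' loop of A; cnt counts multiples of i that lie in the set s.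
-- The conjunct '0 < i' only makes the recursion well-founded: the outer loop calls this
-- with i > 0 exclusively (Python would not terminate for a ≤ m with i ≤ 0).
def gcdPairInnerA (s : PySem.Set Int) (m i a cnt : Int) : Int :=
  if h : a ≤ m ∧ 0 < i then
    gcdPairInnerA s m i (a + i) (if PySem.Set.contains s a then cnt + 1 else cnt)
  else cnt
termination_by (m + 1 - a).toNat
decreasing_by obtain ⟨h1, h2⟩ := h; omega

-- outer 'while i > 0' loop of A ('break' after 'res = i' returns i)
def gcdPairOuterA (s : PySem.Set Int) (m i res : Int) : Int :=
  if _h : i > 0 then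
    let cnt := gcdPairInnerA s m i i 0
    if cnt ≥ 2 then i
    else gcdPairOuterA s m (i - 1) res
  else res
termination_by i.toNat
decreasing_by omega

def max_gcd_pair (S : List Int) : Int :=
  let s := PySem.Set.ofList S          -- s = set(S)
  match PySem.List.max? S (fun x => x) with
  | none => 0                          -- m = max(S) raises ValueError on []; excluded by Pre_
  | some m => gcdPairOuterA s m m 0    -- res = 0; i = m; while i > 0: …

-- ===== PORT B =====
-- _gcd(a, b): Euclid's loop 'while b != 0: a, b = b, a % b'
def pvGcdB (a b : Int) : Int :=
  if h : ¬ b = 0 then pvGcdB b (PySem.Int.mod a b) else a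
termination_by b.natAbs
decreasing_by
  rcases lt_or_gt_of_ne h with hneg | hpos
  · have := PySem.Int.mod_neg_bounds a hneg; omega
  · have h1 := PySem.Int.mod_nonneg a hpos
    have h2 := PySem.Int.mod_lt a hpos
    omega

-- 'while rest: x = rest[0]; rest = rest[1:]; for y in rest: g = _gcd(x, y); if g > best: best = g'
def gcdPairLoopB (rest : List Int) (best : Int) : Int :=
  match rest with
  | [] => best
  | x :: rest' =>
      gcdPairLoopB rest'
        (rest'.foldl (fun b y => let g := pvGcdB x y; if g > b then g else b) best)

def max_gcd_pair_alt (S : List Int) : Int :=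
  let vals := (PySem.Set.ofList S).filter (fun x => decide (0 < x))  -- [x for x in set(S) if x > 0]
  gcdPairLoopB vals 0

-- ===== PRECONDITION & SPEC =====
-- Pre_ excludes only the empty list, on which A's 'max(S)' raises ValueError.
def Pre_max_gcd_pair (S : List Int) : Prop := S ≠ []
instance (S : List Int) : Decidable (Pre_max_gcd_pair S) := by unfold Pre_max_gcd_pair; infer_instance

def pvWitness_max_gcd_pair : List Int := [6, 4, -3]

def Spec_max_gcd_pair (S : List Int) (out : Int) : Prop := out = max_gcd_pair_alt S
instance (S : List Int) (out : Int) : Decidable (Spec_max_gcd_pair S out) := by unfold Spec_max_gcd_pair; infer_instance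

-- ===== CLAIM (what is proved, stated in full; the proofs are below) =====
def Claim_equal_max_gcd_pair : Prop :=
  ∀ (S : List Int), Dom_max_gcd_pair S → Pre_max_gcd_pair S → Spec_max_gcd_pair S (max_gcd_pair S)

-- ===== LEMMAS AND PROOFS =====

-- proof-side counter: the value added to cnt by A's inner loop
def progCnt (s : PySem.Set Int) (m i a : Int) : Nat :=
  if h : a ≤ m ∧ 0 < i then
    (if PySem.Set.contains s a then 1 else 0) + progCnt s m i (a + i)
  else 0
termination_by (m + 1 - a).toNat
decreasing_by obtain ⟨h1, h2⟩ := h; omega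

theorem gcdPairInnerA_eq (s : PySem.Set Int) (m i : Int) :
    ∀ (n : Nat) (a cnt : Int), (m + 1 - a).toNat ≤ n →
      gcdPairInnerA s m i a cnt = cnt + (progCnt s m i a : Int) := by
  intro n
  induction n with
  | zero =>
    intro a cnt hle
    rw [gcdPairInnerA, progCnt]
    have hna : ¬ (a ≤ m ∧ 0 < i) := by omega
    simp [hna]
  | succ n ih =>
    intro a cnt hle
    rw [gcdPairInnerA, progCnt]
    by_cases h : a ≤ m ∧ 0 < i
    · simp only [dif_pos h]
      rw [ih (a + i) _ (by omega)]
      split_ifs <;> push_cast <;> ring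
    · simp [h]

theorem progCnt_one_of (s : PySem.Set Int) (m i : Int) (hi : 0 < i) :
    ∀ (n : Nat) (a x : Int), (m + 1 - a).toNat ≤ n →
      a ≤ x → x ≤ m → i ∣ x - a → PySem.Set.contains s x = true →
      1 ≤ progCnt s m i a := by
  intro n
  induction n with
  | zero => intro a x hle hax hxm hdvd hc; omega
  | succ n ih =>
    intro a x hle hax hxm hdvd hc
    have h : a ≤ m ∧ 0 < i := ⟨le_trans hax hxm, hi⟩
    rw [progCnt]
    simp only [dif_pos h]
    rcases eq_or_lt_of_le hax with heq | hlt
    · subst heq; rw [hc, if_pos rfl]; omega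
    · have hix : a + i ≤ x := by
        have := Int.le_of_dvd (by omega) hdvd
        omega
      have hdvd' : i ∣ x - (a + i) := by
        obtain ⟨k, hk⟩ := hdvd
        exact ⟨k - 1, by linarith [mul_sub i k 1]⟩
      have := ih (a + i) x (by omega) hix hxm hdvd' hc
      split_ifs <;> omega

theorem progCnt_two_of (s : PySem.Set Int) (m i : Int) (hi : 0 < i) :
    ∀ (n : Nat) (a x y : Int), (m + 1 - a).toNat ≤ n →
      x < y → a ≤ x → y ≤ m → i ∣ x - a → i ∣ y - a →
      PySem.Set.contains s x = true → PySem.Set.contains s y = true →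
      2 ≤ progCnt s m i a := by
  intro n
  induction n with
  | zero => intro a x y hle hxy hax hym hdx hdy hcx hcy; omega
  | succ n ih =>
    intro a x y hle hxy hax hym hdx hdy hcx hcy
    have h : a ≤ m ∧ 0 < i := ⟨by omega, hi⟩
    rw [progCnt]
    simp only [dif_pos h]
    have hiy : a + i ≤ y := by
      have := Int.le_of_dvd (by omega) hdy
      omega
    have hdy' : i ∣ y - (a + i) := by
      obtain ⟨k, hk⟩ := hdy
      exact ⟨k - 1, by linarith [mul_sub i k 1]⟩
    rcases eq_or_lt_of_le hax with heq | hlt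
    · subst heq; rw [hcx, if_pos rfl]
      have := progCnt_one_of s m i hi (m + 1 - (a + i)).toNat (a + i) y le_rfl hiy hym hdy' hcy
      omega
    · have hix : a + i ≤ x := by
        have := Int.le_of_dvd (by omega) hdx
        omega
      have hdx' : i ∣ x - (a + i) := by
        obtain ⟨k, hk⟩ := hdx
        exact ⟨k - 1, by linarith [mul_sub i k 1]⟩
      have := ih (a + i) x y (by omega) hxy hix hym hdx' hdy' hcx hcy
      split_ifs <;> omega

theorem exists_of_progCnt_one (s : PySem.Set Int) (m i : Int) (hi : 0 < i) :
    ∀ (n : Nat) (a : Int), (m + 1 - a).toNat ≤ n → 1 ≤ progCnt s m i a →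
      ∃ x, a ≤ x ∧ x ≤ m ∧ i ∣ x - a ∧ PySem.Set.contains s x = true := by
  intro n
  induction n with
  | zero =>
    intro a hle h1
    rw [progCnt] at h1
    have hna : ¬ (a ≤ m ∧ 0 < i) := by omega
    simp [hna] at h1
  | succ n ih =>
    intro a hle h1
    rw [progCnt] at h1
    by_cases h : a ≤ m ∧ 0 < i
    · simp only [dif_pos h] at h1
      by_cases hc : PySem.Set.contains s a = true
      · exact ⟨a, le_rfl, h.1, by simp, hc⟩
      · rw [if_neg hc] at h1
        obtain ⟨x, hax, hxm, hdvd, hcx⟩ := ih (a + i) (by omega) (by omega)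
        refine ⟨x, by omega, hxm, ?_, hcx⟩
        obtain ⟨k, hk⟩ := hdvd
        exact ⟨k + 1, by linarith [mul_add i k 1]⟩
    · simp [h] at h1

theorem exists_of_progCnt_two (s : PySem.Set Int) (m i : Int) (hi : 0 < i) :
    ∀ (n : Nat) (a : Int), (m + 1 - a).toNat ≤ n → 2 ≤ progCnt s m i a →
      ∃ x y, x < y ∧ a ≤ x ∧ y ≤ m ∧ i ∣ x - a ∧ i ∣ y - a ∧
        PySem.Set.contains s x = true ∧ PySem.Set.contains s y = true := by
  intro n
  induction n with
  | zero =>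
    intro a hle h2
    rw [progCnt] at h2
    have hna : ¬ (a ≤ m ∧ 0 < i) := by omega
    simp [hna] at h2
  | succ n ih =>
    intro a hle h2
    rw [progCnt] at h2
    by_cases h : a ≤ m ∧ 0 < i
    · simp only [dif_pos h] at h2
      by_cases hc : PySem.Set.contains s a = true
      · rw [if_pos hc] at h2
        obtain ⟨y, hay, hym, hdvd, hcy⟩ :=
          exists_of_progCnt_one s m i hi (m + 1 - (a + i)).toNat (a + i) le_rfl (by omega)
        refine ⟨a, y, by omega, le_rfl, hym, by simp, ?_, hc, hcy⟩
        obtain ⟨k, hk⟩ := hdvd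
        exact ⟨k + 1, by linarith [mul_add i k 1]⟩
      · rw [if_neg hc] at h2
        obtain ⟨x, y, hxy, hax, hym, hdx, hdy, hcx, hcy⟩ := ih (a + i) (by omega) (by omega)
        obtain ⟨k, hk⟩ := hdx
        obtain ⟨k2, hk2⟩ := hdy
        exact ⟨x, y, hxy, by omega, hym, ⟨k + 1, by linarith [mul_add i k 1]⟩,
          ⟨k2 + 1, by linarith [mul_add i k2 1]⟩, hcx, hcy⟩
    · simp [h] at h2

-- the candidate predicate: i has two distinct positive multiples among the values of S
def TwoMul (S : List Int) (i : Int) : Prop :=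
  ∃ x y, x ∈ S ∧ y ∈ S ∧ x ≠ y ∧ 0 < x ∧ 0 < y ∧ i ∣ x ∧ i ∣ y

theorem progCnt_two_iff (S : List Int) (m i : Int) (hi : 0 < i)
    (hmax : ∀ z ∈ S, z ≤ m) :
    2 ≤ progCnt (PySem.Set.ofList S) m i i ↔ TwoMul S i := by
  constructor
  · intro h2
    obtain ⟨x, y, hxy, hax, hym, hdx, hdy, hcx, hcy⟩ :=
      exists_of_progCnt_two (PySem.Set.ofList S) m i hi (m + 1 - i).toNat i le_rfl h2
    refine ⟨x, y, ?_, ?_, by omega, by omega, by omega, ?_, ?_⟩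
    · exact (PySem.Set.mem_ofList S x).mp ((PySem.Set.contains_iff _ x).mp hcx)
    · exact (PySem.Set.mem_ofList S y).mp ((PySem.Set.contains_iff _ y).mp hcy)
    · obtain ⟨k, hk⟩ := hdx; exact ⟨k + 1, by linarith [mul_add i k 1]⟩
    · obtain ⟨k, hk⟩ := hdy; exact ⟨k + 1, by linarith [mul_add i k 1]⟩
  · rintro ⟨x, y, hxS, hyS, hne, hx0, hy0, hdx, hdy⟩
    have hcx : PySem.Set.contains (PySem.Set.ofList S) x = true :=
      (PySem.Set.contains_iff _ x).mpr ((PySem.Set.mem_ofList S x).mpr hxS)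
    have hcy : PySem.Set.contains (PySem.Set.ofList S) y = true :=
      (PySem.Set.contains_iff _ y).mpr ((PySem.Set.mem_ofList S y).mpr hyS)
    have hix : i ≤ x := Int.le_of_dvd hx0 hdx
    have hiy : i ≤ y := Int.le_of_dvd hy0 hdy
    obtain ⟨k, hk⟩ := hdx
    obtain ⟨k2, hk2⟩ := hdy
    rcases lt_or_gt_of_ne hne with hlt | hgt
    · exact progCnt_two_of (PySem.Set.ofList S) m i hi (m + 1 - i).toNat i x y le_rfl
        hlt hix (hmax y hyS) ⟨k - 1, by linarith [mul_sub i k 1]⟩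
        ⟨k2 - 1, by linarith [mul_sub i k2 1]⟩ hcx hcy
    · exact progCnt_two_of (PySem.Set.ofList S) m i hi (m + 1 - i).toNat i y x le_rfl
        hgt hiy (hmax x hxS) ⟨k2 - 1, by linarith [mul_sub i k2 1]⟩
        ⟨k - 1, by linarith [mul_sub i k 1]⟩ hcy hcx

theorem outerA_char (s : PySem.Set Int) (m : Int) :
    ∀ (n : Nat) (i : Int), i.toNat ≤ n →
      (gcdPairOuterA s m i 0 = 0 ∧ ∀ j, 0 < j → j ≤ i → ¬ 2 ≤ progCnt s m j j) ∨
      (0 < gcdPairOuterA s m i 0 ∧ gcdPairOuterA s m i 0 ≤ i ∧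
        2 ≤ progCnt s m (gcdPairOuterA s m i 0) (gcdPairOuterA s m i 0) ∧
        ∀ j, gcdPairOuterA s m i 0 < j → j ≤ i → ¬ 2 ≤ progCnt s m j j) := by
  intro n
  induction n with
  | zero =>
    intro i hle
    have hni : ¬ i > 0 := by omega
    rw [gcdPairOuterA]
    simp only [dif_neg hni]
    exact Or.inl ⟨trivial, fun j hj hji => absurd (by omega : (0:Int) < i) hni⟩
  | succ n ih =>
    intro i hle
    by_cases hip : i > 0
    · have hinner : gcdPairInnerA s m i i 0 = 0 + (progCnt s m i i : Int) :=
        gcdPairInnerA_eq s m i (m + 1 - i).toNat i 0 le_rfl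
      by_cases h2 : 2 ≤ progCnt s m i i
      · have h2' : gcdPairInnerA s m i i 0 ≥ 2 := by rw [hinner]; omega
        have hout : gcdPairOuterA s m i 0 = i := by
          rw [gcdPairOuterA]; simp [hip, h2']
        rw [hout]
        exact Or.inr ⟨hip, le_rfl, h2, fun j hj hji => by omega⟩
      · have h2' : ¬ gcdPairInnerA s m i i 0 ≥ 2 := by rw [hinner]; omega
        have hstep : gcdPairOuterA s m i 0 = gcdPairOuterA s m (i - 1) 0 := by
          rw [gcdPairOuterA]; simp [hip, h2']
        rw [hstep]
        rcases ih (i - 1) (by omega) with ⟨hz, hall⟩ | ⟨hpos, hle', hcnt, hmaxi⟩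
        · refine Or.inl ⟨hz, fun j hj hji => ?_⟩
          rcases eq_or_lt_of_le hji with heq | hlt
          · subst heq; exact h2
          · exact hall j hj (by omega)
        · refine Or.inr ⟨hpos, by omega, hcnt, fun j hj hji => ?_⟩
          rcases eq_or_lt_of_le hji with heq | hlt
          · subst heq; exact h2
          · exact hmaxi j hj (by omega)
    · rw [gcdPairOuterA]
      simp only [dif_neg hip]
      exact Or.inl ⟨trivial, fun j hj hji => absurd (by omega : (0:Int) < i) hip⟩

theorem pvGcdB_eq (a b : Int) (ha : 0 ≤ a) (hb : 0 ≤ b) :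
    pvGcdB a b = (Int.gcd a b : Int) := by
  have H : ∀ (n : Nat) (a b : Int), 0 ≤ a → 0 ≤ b → b.toNat ≤ n →
      pvGcdB a b = (Int.gcd a b : Int) := by
    intro n
    induction n with
    | zero =>
      intro a b ha hb hle
      have hb0 : b = 0 := by omega
      subst hb0
      rw [pvGcdB]
      simp [Int.natAbs_of_nonneg ha]
    | succ n ih =>
      intro a b ha hb hle
      rw [pvGcdB]
      by_cases hb0 : ¬ b = 0
      · have hbpos : 0 < b := by omega
        rw [dif_pos hb0, PySem.Int.mod_eq_emod_of_pos hbpos]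
        have hmn : 0 ≤ a % b := Int.emod_nonneg a (by omega)
        have hml : a % b < b := Int.emod_lt_of_pos a hbpos
        rw [ih b (a % b) hb hmn (by omega)]
        rw [Int.gcd_comm b (a % b)]
        rw [Int.gcd_emod a b]
      · simp only [dif_neg hb0]
        have hb0' : b = 0 := not_not.mp hb0
        subst hb0'
        simp [Int.natAbs_of_nonneg ha]
  exact H b.toNat a b ha hb le_rfl

theorem foldStep_eq_max (x : Int) :
    (fun (b y : Int) => let g := pvGcdB x y; if g > b then g else b)
      = fun (b y : Int) => max b (pvGcdB x y) := by
  funext b y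
  dsimp only
  split_ifs with h <;> omega

theorem gcdPairLoopB_ge_start (rest : List Int) (best : Int) :
    best ≤ gcdPairLoopB rest best := by
  induction rest generalizing best with
  | nil => exact le_rfl
  | cons x t ih =>
    rw [gcdPairLoopB]
    refine le_trans ?_ (ih _)
    rw [foldStep_eq_max x]
    exact (PySem.List.le_foldl_max_int t (fun y => pvGcdB x y) best).1

theorem gcdPairLoopB_pair_le (x y : Int) :
    ∀ (rest : List Int) (best : Int), [x, y].Sublist rest →
      pvGcdB x y ≤ gcdPairLoopB rest best := by
  intro rest
  induction rest with
  | nil => intro best hsub; cases hsub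
  | cons a t ih =>
    intro best hsub
    cases hsub with
    | cons _ h => rw [gcdPairLoopB]; exact ih _ h
    | cons₂ _ h =>
      have hy : y ∈ t := List.singleton_sublist.mp h
      rw [gcdPairLoopB]
      refine le_trans ?_ (gcdPairLoopB_ge_start t _)
      rw [foldStep_eq_max x]
      exact (PySem.List.le_foldl_max_int t (fun z => pvGcdB x z) best).2 y hy

theorem gcdPairLoopB_cases :
    ∀ (rest : List Int) (best : Int),
      gcdPairLoopB rest best = best ∨
      ∃ x y, [x, y].Sublist rest ∧ gcdPairLoopB rest best = pvGcdB x y := by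
  intro rest
  induction rest with
  | nil => intro best; exact Or.inl rfl
  | cons x t ih =>
    intro best
    rw [gcdPairLoopB]
    rcases ih (t.foldl (fun b y => let g := pvGcdB x y; if g > b then g else b) best) with heq | ⟨x', y', hsub, heq⟩
    · rw [heq, foldStep_eq_max x]
      have hmap : (t.map (fun y => pvGcdB x y)).foldl max best
          = t.foldl (fun b y => max b (pvGcdB x y)) best := by
        rw [List.foldl_map]
      rw [← hmap]
      rcases PySem.List.foldl_max_mem (t.map (fun y => pvGcdB x y)) best with h | h
      · exact Or.inl h
      · obtain ⟨y, hy, hgy⟩ := List.mem_map.mp h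
        exact Or.inr ⟨x, y, List.Sublist.cons₂ x (List.singleton_sublist.mpr hy), hgy.symm⟩
    · exact Or.inr ⟨x', y', List.Sublist.cons x hsub, heq⟩

theorem sublist_pair_of_ne {x y : Int} :
    ∀ {l : List Int}, x ∈ l → y ∈ l → x ≠ y →
      [x, y].Sublist l ∨ [y, x].Sublist l := by
  intro l
  induction l with
  | nil => intro hx; cases hx
  | cons a t ih =>
    intro hx hy hne
    by_cases hxa : x = a
    · subst hxa
      have hyt : y ∈ t := by
        rcases List.mem_cons.mp hy with h | h
        · exact absurd h.symm hne
        · exact h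
      exact Or.inl (List.Sublist.cons₂ x (List.singleton_sublist.mpr hyt))
    · by_cases hya : y = a
      · subst hya
        have hxt : x ∈ t := by
          rcases List.mem_cons.mp hx with h | h
          · exact absurd h hxa
          · exact h
        exact Or.inr (List.Sublist.cons₂ y (List.singleton_sublist.mpr hxt))
      · have hxt : x ∈ t := by
          rcases List.mem_cons.mp hx with h | h
          · exact absurd h hxa
          · exact h
        have hyt : y ∈ t := by
          rcases List.mem_cons.mp hy with h | h
          · exact absurd h hya
          · exact h
        exact (ih hxt hyt hne).imp (List.Sublist.cons a) (List.Sublist.cons a)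

-- ===== VERDICT (by name: the statement is the Claim_ definition above) =====
theorem max_gcd_pair_spec : Claim_equal_max_gcd_pair := by
  intro S _ hPre
  unfold Spec_max_gcd_pair max_gcd_pair max_gcd_pair_alt
  cases hm : PySem.List.max? S (fun x => x) with
  | none => exact absurd ((PySem.List.max?_eq_none_iff S _).mp hm) hPre
  | some m =>
    have hmax : ∀ z ∈ S, z ≤ m := fun z hz => PySem.List.max?_isMax hm z hz
    show gcdPairOuterA (PySem.Set.ofList S) m m 0
        = gcdPairLoopB ((PySem.Set.ofList S).filter (fun x => decide (0 < x))) 0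
    set vals : List Int := (PySem.Set.ofList S).filter (fun x => decide (0 < x)) with hvals
    have hvals_mem : ∀ x : Int, x ∈ vals ↔ x ∈ S ∧ 0 < x := by
      intro x
      rw [hvals, List.mem_filter]
      simp [PySem.Set.mem_ofList]
    have hvals_nodup : vals.Nodup := (PySem.Set.nodup_ofList S).filter _
    set AR : Int := gcdPairOuterA (PySem.Set.ofList S) m m 0 with hARdef
    set BR : Int := gcdPairLoopB vals 0 with hBRdef
    have hBR0 : (0 : Int) ≤ BR := gcdPairLoopB_ge_start vals 0
    -- any pair occurring in B's loop is a candidate for A's loop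
    have hpair : ∀ u v : Int, [u, v].Sublist vals →
        0 < (Int.gcd u v : Int) ∧ (Int.gcd u v : Int) ≤ m ∧ TwoMul S (Int.gcd u v) ∧
          pvGcdB u v = (Int.gcd u v : Int) := by
      intro u v hsub
      have hu := (hvals_mem u).mp (hsub.subset (by simp))
      have hv := (hvals_mem v).mp (hsub.subset (by simp))
      have hne : u ≠ v := by
        have := hsub.nodup hvals_nodup
        simp [List.nodup_cons] at this
        exact this
      have hgpos : 0 < (Int.gcd u v : Int) := by
        exact_mod_cast Int.gcd_pos_iff.mpr (Or.inl (by omega : u ≠ 0))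
      have hglu : (Int.gcd u v : Int) ≤ u := Int.le_of_dvd hu.2 (Int.gcd_dvd_left u v)
      exact ⟨hgpos, le_trans hglu (hmax u hu.1), ⟨u, v, hu.1, hv.1, hne, hu.2, hv.2,
        Int.gcd_dvd_left u v, Int.gcd_dvd_right u v⟩,
        pvGcdB_eq u v hu.2.le hv.2.le⟩
    rcases outerA_char (PySem.Set.ofList S) m m.toNat m le_rfl with ⟨hz, hnone⟩ |
        ⟨hpos, hlem, hcnt, hmaxA⟩
    · -- A finds no divisor with two multiples: B's loop can see no pair either
      rw [← hARdef] at hz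
      rcases gcdPairLoopB_cases vals 0 with h0 | ⟨u, v, hsub, heq⟩
      · rw [hz, hBRdef]
        exact h0.symm
      · exfalso
        obtain ⟨hgpos, hgm, htwo, _⟩ := hpair u v hsub
        exact hnone (Int.gcd u v) hgpos hgm
          ((progCnt_two_iff S m (Int.gcd u v) hgpos hmax).mpr htwo)
    · -- A returns the largest candidate AR; B's maximum equals it
      rw [← hARdef] at hpos hlem hcnt hmaxA
      obtain ⟨x, y, hxS, hyS, hne, hx0, hy0, hdx, hdy⟩ :=
        (progCnt_two_iff S m AR hpos hmax).mp hcnt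
      have hgpos : 0 < (Int.gcd x y : Int) := by
        exact_mod_cast Int.gcd_pos_iff.mpr (Or.inl (by omega : x ≠ 0))
      have hARg : AR ≤ (Int.gcd x y : Int) := Int.le_of_dvd hgpos (Int.dvd_coe_gcd hdx hdy)
      have hxv : x ∈ vals := (hvals_mem x).mpr ⟨hxS, hx0⟩
      have hyv : y ∈ vals := (hvals_mem y).mpr ⟨hyS, hy0⟩
      have hARBR : AR ≤ BR := by
        rcases sublist_pair_of_ne hxv hyv hne with hsub | hsub
        · have h := gcdPairLoopB_pair_le x y vals 0 hsub
          rw [pvGcdB_eq x y hx0.le hy0.le] at h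
          exact le_trans hARg h
        · have h := gcdPairLoopB_pair_le y x vals 0 hsub
          rw [pvGcdB_eq y x hy0.le hx0.le] at h
          rw [Int.gcd_comm] at hARg
          exact le_trans hARg h
      rcases gcdPairLoopB_cases vals 0 with h0 | ⟨u, v, hsub, heq⟩
      · rw [← hBRdef] at h0; omega
      · rw [← hBRdef] at heq
        obtain ⟨hgpos', hgm', htwo', hgeq⟩ := hpair u v hsub
        have hcnt' := (progCnt_two_iff S m (Int.gcd u v) hgpos' hmax).mpr htwo'
        have hle : (Int.gcd u v : Int) ≤ AR := by
          by_contra hlt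
          exact hmaxA (Int.gcd u v) (by omega) hgm' hcnt'
        rw [heq, hgeq]
        omega
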